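-- pv_equiv track=rewrite | github.com/GioByte10/Python | Detect Pattern/Detect_Pattern.py | detect_pattern
-- ===== SOURCE A (Python) =====
-- def detect_pattern(s1, s2):
--     c1 = None
--     c2 = None
--
--     if len(s1) == len(s2):
--         for i in range(len(s1) - 1):
--             for j in range(len(s1) - i - 1):
--                 if s1[i] == s1[j + i + 1]:
--                     c1 = i
--                     c2 = j + i + 1
--
--
--         if c1 is None:
--             return True
--
--         elif s2[c1] == s2[c2]:
--             return True
--
--         else:
--             return False
--
--     else:
--         return False
-- ===== SOURCE B (Python) =====
-- def detect_pattern(s1, s2):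
--     if len(s1) != len(s2):
--         return False
--     for i in range(len(s1) - 2, -1, -1):
--         if s1[i] in s1[i + 1:]:
--             last = len(s1) - 1 - s1[::-1].index(s1[i])
--             return s2[i] == s2[last]
--     return True
-- ===== Notes on version B (the rewrite author's own statement) =====
-- stated objective: alternative
-- what changed: A fills (c1,c2) by nested forward loops over all index pairs with last-write-wins; B scans s1 once from the right, returns at the first index whose character recurs in the suffix, and locates the partner via a reversed-string index lookup instead of an inner loop.
import Mathlib
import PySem

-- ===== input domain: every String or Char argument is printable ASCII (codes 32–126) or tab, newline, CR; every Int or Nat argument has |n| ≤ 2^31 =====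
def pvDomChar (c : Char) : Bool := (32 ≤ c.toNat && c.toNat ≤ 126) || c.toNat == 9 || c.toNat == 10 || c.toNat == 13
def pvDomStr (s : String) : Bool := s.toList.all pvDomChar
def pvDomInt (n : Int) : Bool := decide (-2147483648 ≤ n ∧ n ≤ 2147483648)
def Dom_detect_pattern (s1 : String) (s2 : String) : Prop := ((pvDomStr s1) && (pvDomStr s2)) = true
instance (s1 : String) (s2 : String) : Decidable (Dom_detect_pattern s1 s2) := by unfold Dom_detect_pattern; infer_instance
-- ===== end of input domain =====

-- B replaces A's nested forward scan (last write wins) by a single backward scan with an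
-- early return, a suffix-membership test and a reversed-index lookup (objective: alternative).

-- ===== PORT A =====
-- literal port of A: nested loops over i and j, state (c1, c2) overwritten on every match
def detect_pattern (s1 : String) (s2 : String) : Bool :=
  let l1 := s1.toList
  let l2 := s2.toList
  if l1.length == l2.length then
    let st : Option Nat × Option Nat :=
      (List.range (l1.length - 1)).foldl (fun st i =>
        (List.range (l1.length - i - 1)).foldl (fun st j =>
          if l1.getD i ' ' == l1.getD (j + i + 1) ' ' then (some i, some (j + i + 1)) else st) st)
        ((none, none) : Option Nat × Option Nat)
    match st with
    | (none, _) => true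
    | (some c1, some c2) => l2.getD c1 ' ' == l2.getD c2 ' '
    | (some _, none) => true  -- unreachable: c1 and c2 are always assigned together
  else
    false

-- ===== PORT B =====
-- B's loop `for i in range(len(s1)-2, -1, -1)` with its early return; argument k = i + 1
def bLoop (l1 l2 : List Char) : Nat → Bool
  | 0 => true
  | k + 1 =>
    if (l1.drop (k + 1)).contains (l1.getD k ' ') then
      -- `last = len(s1) - 1 - s1[::-1].index(s1[i])`; `return s2[i] == s2[last]`
      l2.getD k ' ' == l2.getD (l1.length - 1 - (l1.reverse).idxOf (l1.getD k ' ')) ' '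
    else bLoop l1 l2 k

def detect_pattern_alt (s1 : String) (s2 : String) : Bool :=
  let l1 := s1.toList
  let l2 := s2.toList
  if l1.length != l2.length then false
  else bLoop l1 l2 (l1.length - 1)

-- ===== PRECONDITION & SPEC =====
def Spec_detect_pattern (s1 : String) (s2 : String) (out : Bool) : Prop := out = detect_pattern_alt s1 s2
instance (s1 : String) (s2 : String) (out : Bool) : Decidable (Spec_detect_pattern s1 s2 out) := by unfold Spec_detect_pattern; infer_instance

-- ===== CLAIM (what is proved, stated in full; the proofs are below) =====
def Claim_equal_detect_pattern : Prop := ∀ (s1 : String) (s2 : String), Dom_detect_pattern s1 s2 → Spec_detect_pattern s1 s2 (detect_pattern s1 s2)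

-- ===== LEMMAS AND PROOFS =====

/-- The greatest `j < m` with `p j`, if any: the value a last-write-wins loop keeps. -/
def lastHit (p : Nat → Bool) : Nat → Option Nat
  | 0 => none
  | m + 1 => if p m then some m else lastHit p m

theorem lastHit_congr (p q : Nat → Bool) (m : Nat) (h : ∀ j, j < m → p j = q j) :
    lastHit p m = lastHit q m := by
  induction m with
  | zero => rfl
  | succ m ih =>
    simp only [lastHit, h m (Nat.lt_succ_self m)]
    exact if_congr Iff.rfl rfl (ih fun j hj => h j (Nat.lt_succ_of_lt hj))

theorem lastHit_spec (p : Nat → Bool) (m j : Nat) (h : lastHit p m = some j) :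
    j < m ∧ p j = true := by
  induction m with
  | zero => simp [lastHit] at h
  | succ m ih =>
    by_cases hp : p m = true
    · simp [lastHit, hp] at h; subst h; exact ⟨Nat.lt_succ_self m, hp⟩
    · simp [lastHit, hp] at h
      obtain ⟨h1, h2⟩ := ih h
      exact ⟨Nat.lt_succ_of_lt h1, h2⟩

theorem lastHit_eq_some (p : Nat → Bool) (m j : Nat) (h1 : j < m) (h2 : p j = true)
    (h3 : ∀ k, j < k → k < m → p k = false) : lastHit p m = some j := by
  induction m with
  | zero => omega
  | succ m ih =>
    by_cases hj : j = m
    · subst hj; simp [lastHit, h2]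
    · have hpm : p m = false := h3 m (by omega) (Nat.lt_succ_self m)
      simp [lastHit, hpm]
      exact ih (by omega) (fun k hk1 hk2 => h3 k hk1 (Nat.lt_succ_of_lt hk2))

theorem lastHit_isSome (p : Nat → Bool) (m j : Nat) (h1 : j < m) (h2 : p j = true) :
    (lastHit p m).isSome = true := by
  induction m with
  | zero => omega
  | succ m ih =>
    cases hpm : p m with
    | true => simp [lastHit, hpm]
    | false =>
      simp only [lastHit, hpm, Bool.false_eq_true, if_false]
      by_cases hj : j = m
      · exact absurd h2 (by simp [hj, hpm])
      · exact ih (by omega)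

theorem lastHit_isSome_exists (p : Nat → Bool) (m : Nat) (h : (lastHit p m).isSome = true) :
    ∃ j, j < m ∧ p j = true := by
  obtain ⟨j, hj⟩ := Option.isSome_iff_exists.mp h
  exact ⟨j, lastHit_spec p m j hj⟩

/-- A last-write-wins fold over `List.range m` keeps the value at the greatest hit. -/
theorem foldl_range_lastwrite {α : Type} (p : Nat → Bool) (g : Nat → α) (m : Nat) (st : α) :
    (List.range m).foldl (fun st j => if p j then g j else st) st
      = (lastHit p m).elim st g := by
  induction m generalizing st with
  | zero => rfl
  | succ m ih =>
    rw [List.range_succ, List.foldl_append]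
    simp only [List.foldl_cons, List.foldl_nil, lastHit]
    cases hp : p m with
    | true => simp
    | false =>
      simp only [Bool.false_eq_true, if_false]
      exact ih st

/-- Same, with an option-valued body (the shape of A's outer loop after the inner loop is solved). -/
theorem foldl_range_lastwrite_elim {α : Type} (o : Nat → Option Nat) (g : Nat → Nat → α)
    (m : Nat) (st : α) :
    (List.range m).foldl (fun st i => (o i).elim st (g i)) st
      = (lastHit (fun i => (o i).isSome) m).elim st (fun i => g i ((o i).getD 0)) := by
  induction m generalizing st with
  | zero => rfl
  | succ m ih =>
    rw [List.range_succ, List.foldl_append]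
    simp only [List.foldl_cons, List.foldl_nil, lastHit]
    by_cases ho : (o m).isSome = true
    · obtain ⟨b, hb⟩ := Option.isSome_iff_exists.mp ho
      simp [hb]
    · have hb : o m = none := Option.not_isSome_iff_eq_none.mp ho
      simp only [hb, Option.elim, Option.isSome_none, Bool.false_eq_true, if_false]
      exact ih st

theorem idxOf_rev_getElem (l : List Char) (c : Char) (hc : c ∈ l) :
    let r := l.reverse.idxOf c
    r < l.length ∧ l[l.length - 1 - r]? = some c ∧
      ∀ k, l.length - 1 - r < k → (hk : k < l.length) → l[k] ≠ c := by
  intro r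
  have hcr : c ∈ l.reverse := List.mem_reverse.mpr hc
  have hr : r < l.reverse.length := List.idxOf_lt_length_of_mem hcr
  have hrl : r < l.length := by simpa using hr
  refine ⟨hrl, ?_, ?_⟩
  · have h1 : l.reverse[r] = c := List.getElem_idxOf hr
    rw [List.getElem_reverse] at h1
    rw [List.getElem?_eq_getElem (by omega)]
    exact congrArg some h1
  · intro k hk1 hk2 he
    have hk' : l.length - 1 - k < l.reverse.length := by rw [List.length_reverse]; omega
    have hrev : l.reverse[l.length - 1 - k] = c := by
      rw [List.getElem_reverse]
      have h2 : l.length - 1 - (l.length - 1 - k) = k := by omega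
      simp only [h2]
      exact he
    have hlt : l.length - 1 - k < List.findIdx (· == c) l.reverse := by
      have : r = List.findIdx (· == c) l.reverse := rfl
      omega
    have hne := List.not_of_lt_findIdx (xs := l.reverse) hlt
    simp at hne
    have hkk : l.length - 1 - (l.length - 1 - k) = k := by omega
    simp only [hkk] at hne
    exact hne he

theorem bLoop_eq (l1 l2 : List Char) (k : Nat) :
    bLoop l1 l2 k = (lastHit (fun i => (l1.drop (i + 1)).contains (l1.getD i ' ')) k).elim true
      (fun i => l2.getD i ' ' == l2.getD (l1.length - 1 - (l1.reverse).idxOf (l1.getD i ' ')) ' ') := by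
  induction k with
  | zero => rfl
  | succ k ih =>
    simp only [bLoop, lastHit]
    by_cases hm : l1.getD k ' ' ∈ l1.drop (k + 1)
    · have hc : ((l1.drop (k + 1)).contains (l1.getD k ' ') = true) := by simpa using hm
      rw [if_pos hc, if_pos hc]
      rfl
    · have hc : ¬((l1.drop (k + 1)).contains (l1.getD k ' ') = true) := by simpa using hm
      rw [if_neg hc, if_neg hc]
      exact ih

-- For i < n - 1: A's inner-loop hit test agrees with B's suffix-membership test.
theorem hit_agree (l1 : List Char) (i : Nat) (hi : i < l1.length - 1) :
    (lastHit (fun j => l1.getD i ' ' == l1.getD (j + i + 1) ' ') (l1.length - i - 1)).isSome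
      = (l1.drop (i + 1)).contains (l1.getD i ' ') := by
  by_cases h : (l1.drop (i + 1)).contains (l1.getD i ' ') = true
  · have hmem : l1.getD i ' ' ∈ l1.drop (i + 1) := by simpa using h
    obtain ⟨j, hj, hje⟩ := List.getElem_of_mem hmem
    have hjlen : j < l1.length - i - 1 := by simp at hj; omega
    have hidx : i + 1 + j < l1.length := by omega
    rw [List.getElem_drop] at hje
    have hp : (l1.getD i ' ' == l1.getD (j + i + 1) ' ') = true := by
      rw [List.getD_eq_getElem l1 ' ' (by omega : j + i + 1 < l1.length)]
      have : l1[j + i + 1]'(by omega) = l1[i + 1 + j]'hidx := by congr 1; omega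
      rw [this, hje]
      exact beq_self_eq_true _
    rw [h]; exact lastHit_isSome _ _ j hjlen hp
  · simp only [h]
    rw [Bool.eq_false_iff]
    intro hs
    obtain ⟨j, hj, hp⟩ := lastHit_isSome_exists _ _ hs
    apply h
    have hidx : j + i + 1 < l1.length := by omega
    have : l1.getD i ' ' = l1[j + i + 1] := by
      have := beq_iff_eq.mp hp
      rwa [List.getD_eq_getElem l1 ' ' hidx] at this
    have hmem : l1.getD i ' ' ∈ l1.drop (i + 1) := by
      rw [this]
      have : l1[j + i + 1]'hidx = (l1.drop (i + 1))[j]'(by simp; omega) := by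
        rw [List.getElem_drop]; congr 1; omega
      rw [this]; exact List.getElem_mem _
    simpa using hmem

-- For the chosen i: A's last matching partner index is the last occurrence B computes.
theorem partner_agree (l1 : List Char) (i : Nat) (hi : i < l1.length - 1)
    (h : (l1.drop (i + 1)).contains (l1.getD i ' ') = true) :
    (lastHit (fun j => l1.getD i ' ' == l1.getD (j + i + 1) ' ') (l1.length - i - 1)).getD 0 + i + 1
      = l1.length - 1 - (l1.reverse).idxOf (l1.getD i ' ') := by
  set c := l1.getD i ' ' with hc
  have hmem : c ∈ l1.drop (i + 1) := by simpa using h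
  have hcl : c ∈ l1 := List.mem_of_mem_drop hmem
  obtain ⟨hr, hget, hafter⟩ := idxOf_rev_getElem l1 c hcl
  set r := l1.reverse.idxOf c with hrdef
  set k0 := l1.length - 1 - r with hk0
  -- some occurrence of c lies strictly after i, hence k0 > i
  obtain ⟨j, hj, hje⟩ := List.getElem_of_mem hmem
  have hjlen : j < l1.length - i - 1 := by simp at hj; omega
  rw [List.getElem_drop] at hje
  have hk0i : i < k0 := by
    by_contra hle
    exact hafter (i + 1 + j) (by omega) (by omega) hje
  have hk0get : l1[k0]'(by omega) = c := by
    rw [List.getElem?_eq_getElem (by omega : k0 < l1.length)] at hget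
    exact Option.some.inj hget
  have hlh : lastHit (fun j => l1.getD i ' ' == l1.getD (j + i + 1) ' ') (l1.length - i - 1)
      = some (k0 - i - 1) := by
    apply lastHit_eq_some
    · omega
    · rw [← hc, List.getD_eq_getElem l1 ' ' (show k0 - i - 1 + i + 1 < l1.length by omega)]
      have : l1[k0 - i - 1 + i + 1]'(by omega) = l1[k0]'(by omega) := by congr 1; omega
      rw [this, hk0get]
      exact beq_self_eq_true _
    · intro k hk1 hk2
      rw [Bool.eq_false_iff]
      intro hp
      have hidx : k + i + 1 < l1.length := by omega
      have : l1[k + i + 1] = c := (beq_iff_eq.mp (by rwa [List.getD_eq_getElem l1 ' ' hidx] at hp)).symm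
      exact hafter (k + i + 1) (by omega) hidx this
  rw [hlh]
  simp only [Option.getD_some]
  omega

-- ===== VERDICT (by name: the statement is the Claim_ definition above) =====
theorem detect_pattern_spec : Claim_equal_detect_pattern := by
  intro s1 s2 _
  unfold Spec_detect_pattern detect_pattern detect_pattern_alt
  set l1 := s1.toList
  set l2 := s2.toList
  by_cases hlen : l1.length = l2.length
  · simp only [hlen, beq_self_eq_true, if_true, bne_self_eq_false, Bool.false_eq_true, if_false]
    -- rewrite A's inner loops
    have hinner : (fun (st : Option Nat × Option Nat) (i : Nat) =>
        (List.range (l1.length - i - 1)).foldl (fun st j =>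
          if l1.getD i ' ' == l1.getD (j + i + 1) ' ' then (some i, some (j + i + 1)) else st) st)
        = fun st i => (lastHit (fun j => l1.getD i ' ' == l1.getD (j + i + 1) ' ')
            (l1.length - i - 1)).elim st (fun j => (some i, some (j + i + 1))) := by
      funext st i
      exact foldl_range_lastwrite _ _ _ _
    rw [hlen] at hinner
    rw [hinner, foldl_range_lastwrite_elim, bLoop_eq]
    have hcongr : lastHit (fun i => (lastHit (fun j => l1.getD i ' ' == l1.getD (j + i + 1) ' ')
          (l2.length - i - 1)).isSome) (l2.length - 1)
        = lastHit (fun i => (l1.drop (i + 1)).contains (l1.getD i ' ')) (l2.length - 1) := by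
      apply lastHit_congr
      intro i hi
      have := hit_agree l1 i (by omega)
      rwa [hlen] at this
    rw [hcongr]
    cases hlh : lastHit (fun i => (l1.drop (i + 1)).contains (l1.getD i ' ')) (l2.length - 1) with
    | none => rfl
    | some i =>
      obtain ⟨hi, hq⟩ := lastHit_spec _ _ _ hlh
      simp only [Option.elim]
      have hlen2 : l2.length - i - 1 = l1.length - i - 1 := by omega
      rw [hlen2, partner_agree l1 i (by omega) hq]
  · have h1 : (l1.length == l2.length) = false := by simpa using hlen
    have h2 : (l1.length != l2.length) = true := by simpa using hlen
    simp [h1, h2]
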